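-- pv_equiv track=rewrite | github.com/naldokan/mindlogger-app-backend | girderformindlogger/utility/jsonld_expander.py | getFromLongestMatchingValue
-- ===== SOURCE A (Python) =====
-- def getFromLongestMatchingValue(
--     objectList,
--     listOfValues,
--     keyToMatch,
--     caseInsensitive=True
-- ):
--     """
--     Function to take a list of objects, a list of values and a key to match and
--     return the object with the longest matching value for that key or None if
--     no value matches for that that key.
--
--     :param objectList: The list of objects.
--     :type objectList: list of dicts
--     :param listOfValues: A list of values to try to match
--     :type listOfValues: list of string values
--     :param keyToMatch: key in which to match the value
--     :type keyToMatch: str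
--     :param caseInsensitive: Case insensitive value matching?
--     :type caseInsensitive: boolean
--     :returns: dict with longest matching value for specified key in object
--     """
--     objectList = objectList.copy()
--     if caseInsensitive:
--         listOfValues = [k.lower() for k in listOfValues]
--     value = max(
--         [str(k) for k in listOfValues],
--         key=len
--     ) if len(listOfValues) else None
--     if value and value in listOfValues:
--         listOfValues.remove(value)
--     for object in sorted(
--         objectList,
--         key=lambda i: len(i.get(keyToMatch, "")),
--         reverse=True
--     ):
--         if (
--             object.get(keyToMatch, '').lower(
--             ) if caseInsensitive else object.get(keyToMatch, '')
--         )==value: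
--             return(object)
--     if len(listOfValues)>=1:
--         return(getFromLongestMatchingValue(
--             objectList,
--             listOfValues,
--             keyToMatch,
--             caseInsensitive
--         ))
--     for object in sorted(
--         objectList,
--         key=lambda i: len(i.get(keyToMatch, "")),
--         reverse=False
--     ):
--         generic = object.get(keyToMatch, '').lower(
--         ) if caseInsensitive else object.get(keyToMatch, '')
--         generic = generic.split('-')[0] if '-' in generic else generic
--         if generic==value:
--             return(object)
--     return({})
-- ===== SOURCE B (Python) =====
-- def getFromLongestMatchingValue(
--     objectList,
--     listOfValues,
--     keyToMatch,
--     caseInsensitive=True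
-- ):
--     def val(obj):
--         v = obj.get(keyToMatch, '')
--         return v.lower() if caseInsensitive else v
--
--     vals = [v.lower() for v in listOfValues] if caseInsensitive else list(listOfValues)
--     firstExact = {}
--     for obj in objectList:
--         v = val(obj)
--         if v not in firstExact:
--             firstExact[v] = obj
--     order = sorted(vals, key=len, reverse=True)
--     for v in order:
--         if v in firstExact:
--             return firstExact[v]
--     if not order:
--         return {}
--     last = order[-1]
--     best = None
--     for obj in objectList:
--         v = val(obj)
--         prefix = v.split('-')[0] if '-' in v else v
--         if prefix == last and (best is None or len(v) < len(val(best))):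
--             best = obj
--     return best if best is not None else {}
-- ===== Notes on version B (the rewrite author's own statement) =====
-- stated objective: faster
-- what changed: A retries recursively, re-sorting the object list and re-scanning/removing from the value list on every round; B builds a first-match index over the objects once, sorts the values once by length descending to get the whole trial order, and replaces the ascending object sort of the fallback by a single running-minimum pass.
import Mathlib
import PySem

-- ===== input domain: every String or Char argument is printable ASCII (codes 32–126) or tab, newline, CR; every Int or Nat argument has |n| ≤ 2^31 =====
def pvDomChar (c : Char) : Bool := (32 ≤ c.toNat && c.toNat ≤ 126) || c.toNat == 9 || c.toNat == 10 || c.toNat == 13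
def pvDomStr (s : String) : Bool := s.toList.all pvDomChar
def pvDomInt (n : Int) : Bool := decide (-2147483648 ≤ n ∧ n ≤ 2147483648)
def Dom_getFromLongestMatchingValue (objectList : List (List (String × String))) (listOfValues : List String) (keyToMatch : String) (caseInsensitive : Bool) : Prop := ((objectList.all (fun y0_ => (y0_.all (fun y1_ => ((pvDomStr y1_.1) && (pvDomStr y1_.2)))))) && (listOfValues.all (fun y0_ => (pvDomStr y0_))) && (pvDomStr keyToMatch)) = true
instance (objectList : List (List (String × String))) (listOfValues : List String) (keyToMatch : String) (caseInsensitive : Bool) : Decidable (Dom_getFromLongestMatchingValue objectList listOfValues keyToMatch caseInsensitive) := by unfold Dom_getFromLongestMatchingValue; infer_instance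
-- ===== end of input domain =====

-- B replaces A's retry-recursion (re-sorting the object list every round) by one object pass
-- building a first-match index plus one stable sort of the values; return value proved equal on Pre_.
-- Side effects: Python A removes matched entries from listOfValues in place (observable when
-- caseInsensitive is False); B does not mutate its arguments — the claim is about the RETURN value only.

-- shared accessor: Python's object.get(keyToMatch, '') (dict lookup = first match)
def pvGet (o : List (String × String)) (k : String) : String := (PySem.Dict.mk o).getD k ""

-- ===== PORT A =====
-- literal transliteration of A; `fuel` only makes the recursion structural: it starts at
-- listOfValues.length + 1 and is never exhausted on inputs satisfying Pre_ (A recurses forever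
-- exactly on the inputs Pre_ excludes).
def getFLMVGo (fuel : Nat) (objectList : List (List (String × String))) (listOfValues : List String) (keyToMatch : String) (caseInsensitive : Bool) : List (String × String) :=
  match fuel with
  | 0 => []
  | fuel + 1 =>
    let lov := if caseInsensitive then listOfValues.map PySem.Str.lower else listOfValues
    let value : Option String :=
      if lov.length ≠ 0 then PySem.List.max? (lov.map (fun k => k)) PySem.Str.len else none
    let lov2 : List String :=
      match value with
      | some v => if v ≠ "" ∧ v ∈ lov then ((PySem.List.remove? lov v).getD lov) else lov
      | none => lov
    match (PySem.List.sorted objectList (fun i => PySem.Str.len (pvGet i keyToMatch)) true).find?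
        (fun o => decide (some (if caseInsensitive then PySem.Str.lower (pvGet o keyToMatch) else pvGet o keyToMatch) = value)) with
    | some o => o
    | none =>
      if lov2.length ≥ 1 then
        getFLMVGo fuel objectList lov2 keyToMatch caseInsensitive
      else
        ((PySem.List.sorted objectList (fun i => PySem.Str.len (pvGet i keyToMatch)) false).find?
            (fun o =>
              let g := if caseInsensitive then PySem.Str.lower (pvGet o keyToMatch) else pvGet o keyToMatch
              -- g.split('-')[0]: split('-') is never empty, [0] ported as headD ""
              let g2 := if PySem.Str.isIn "-" g then ((PySem.Str.split? g "-").getD []).headD "" else g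
              decide (some g2 = value))).getD []

def getFromLongestMatchingValue (objectList : List (List (String × String))) (listOfValues : List String) (keyToMatch : String) (caseInsensitive : Bool) : List (String × String) :=
  getFLMVGo (listOfValues.length + 1) objectList listOfValues keyToMatch caseInsensitive

-- ===== PORT B =====
def getFromLongestMatchingValue_alt (objectList : List (List (String × String))) (listOfValues : List String) (keyToMatch : String) (caseInsensitive : Bool) : List (String × String) :=
  let val : List (String × String) → String := fun o =>
    if caseInsensitive then PySem.Str.lower (pvGet o keyToMatch) else pvGet o keyToMatch
  let vals := if caseInsensitive then listOfValues.map PySem.Str.lower else listOfValues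
  let firstExact : PySem.Dict String (List (String × String)) :=
    objectList.foldl (fun d o => if d.contains (val o) then d else d.insert (val o) o) PySem.Dict.empty
  let order := PySem.List.sorted vals PySem.Str.len true
  match order.find? (fun v => firstExact.contains v) with
  | some v => (firstExact.get? v).getD []
  | none =>
    match order.getLast? with
    | none => []
    | some last =>
      (objectList.foldl
        (fun acc o =>
          let v := val o
          let pre := if PySem.Str.isIn "-" v then ((PySem.Str.split? v "-").getD []).headD "" else v
          if pre = last then
            match acc with
            | none => some o
            | some b => if PySem.Str.len (val o) < PySem.Str.len (val b) then some o else some b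
          else acc)
        (none : Option (List (String × String)))).getD []

-- ===== PRECONDITION & SPEC =====
-- Pre_ excludes exactly the inputs on which A raises RecursionError: the (lowered) value list
-- contains the empty string while no object's (lowered) value occurs in that list — there A
-- re-calls itself with an unchanged argument forever.
def Pre_getFromLongestMatchingValue (objectList : List (List (String × String))) (listOfValues : List String) (keyToMatch : String) (caseInsensitive : Bool) : Prop :=
  let vals := if caseInsensitive then listOfValues.map PySem.Str.lower else listOfValues
  "" ∈ vals → ∃ o ∈ objectList,
    (if caseInsensitive then PySem.Str.lower (pvGet o keyToMatch) else pvGet o keyToMatch) ∈ vals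
instance (objectList : List (List (String × String))) (listOfValues : List String) (keyToMatch : String) (caseInsensitive : Bool) : Decidable (Pre_getFromLongestMatchingValue objectList listOfValues keyToMatch caseInsensitive) := by unfold Pre_getFromLongestMatchingValue; infer_instance
def pvWitness_getFromLongestMatchingValue : (List (List (String × String))) × List String × String × Bool :=
  ([[("k", "ab"), ("j", "x")], [("k", "AB-c")]], ["AB", "a"], "k", true)

def Spec_getFromLongestMatchingValue (objectList : List (List (String × String))) (listOfValues : List String) (keyToMatch : String) (caseInsensitive : Bool) (out : List (String × String)) : Prop := out = getFromLongestMatchingValue_alt objectList listOfValues keyToMatch caseInsensitive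
instance (objectList : List (List (String × String))) (listOfValues : List String) (keyToMatch : String) (caseInsensitive : Bool) (out : List (String × String)) : Decidable (Spec_getFromLongestMatchingValue objectList listOfValues keyToMatch caseInsensitive out) := by unfold Spec_getFromLongestMatchingValue; infer_instance

-- ===== CLAIM (what is proved, stated in full; the proofs are below) =====
def Claim_equal_getFromLongestMatchingValue : Prop := ∀ (objectList : List (List (String × String))) (listOfValues : List String) (keyToMatch : String) (caseInsensitive : Bool), Dom_getFromLongestMatchingValue objectList listOfValues keyToMatch caseInsensitive → Pre_getFromLongestMatchingValue objectList listOfValues keyToMatch caseInsensitive → Spec_getFromLongestMatchingValue objectList listOfValues keyToMatch caseInsensitive (getFromLongestMatchingValue objectList listOfValues keyToMatch caseInsensitive)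
-- ===== LEMMAS AND PROOFS =====

-- proof-side abbreviations
def pvVal (k : String) (ci : Bool) (o : List (String × String)) : String :=
  if ci then PySem.Str.lower (pvGet o k) else pvGet o k

def pvExact (objs : List (List (String × String))) (k : String) (ci : Bool) (v : String) : Option (List (String × String)) :=
  objs.find? (fun o => pvVal k ci o == v)

def pvFallback (objs : List (List (String × String))) (k : String) (ci : Bool) (last : String) : List (String × String) :=
  (objs.foldl
    (fun acc o =>
      let v := pvVal k ci o
      let pre := if PySem.Str.isIn "-" v then ((PySem.Str.split? v "-").getD []).headD "" else v
      if pre = last then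
        match acc with
        | none => some o
        | some b => if PySem.Str.len (pvVal k ci o) < PySem.Str.len (pvVal k ci b) then some o else some b
      else acc)
    (none : Option (List (String × String)))).getD []

def pvCore (objs : List (List (String × String))) (k : String) (ci : Bool) (ord : List String) : List (String × String) :=
  match ord.find? (fun v => (pvExact objs k ci v).isSome) with
  | some v => (pvExact objs k ci v).getD []
  | none =>
    match ord.getLast? with
    | none => []
    | some last => pvFallback objs k ci last

theorem pv_sorted_append_single {α κ : Type} [LT κ] [DecidableLT κ] (xs : List α) (x : α) (key : α → κ) (rev : Bool) :
    PySem.List.sorted (xs ++ [x]) key rev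
      = PySem.List.insertBy (if rev then fun a b => decide (key b < key a) else fun a b => decide (key a < key b)) x (PySem.List.sorted xs key rev) := by
  cases rev <;> simp [PySem.List.sorted, List.foldl_append]

theorem pv_insertBy_nil {α : Type} (br : α → α → Bool) (x : α) :
    PySem.List.insertBy br x [] = [x] := rfl

theorem pv_insertBy_cons {α : Type} (br : α → α → Bool) (x y : α) (ys : List α) :
    PySem.List.insertBy br x (y :: ys) = if br x y then x :: y :: ys else y :: PySem.List.insertBy br x ys := rfl

theorem pv_find?_insertBy_of_neg {α : Type} (br : α → α → Bool) (p : α → Bool) (x : α) (ys : List α)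
    (hx : p x = false) : (PySem.List.insertBy br x ys).find? p = ys.find? p := by
  induction ys with
  | nil => simp [PySem.List.insertBy, hx]
  | cons y ys ih =>
    rw [pv_insertBy_cons]
    by_cases h : br x y = true
    · rw [if_pos h]; simp [List.find?_cons, hx]
    · rw [if_neg h]; cases hpy : p y <;> simp [List.find?_cons, hpy, ih]

theorem pv_find?_insertBy_desc {α κ : Type} [LinearOrder κ] (key : α → κ) (p : α → Bool) (x : α) (ys : List α)
    (hx : p x = true) (hpw : ys.Pairwise (fun a b => key b ≤ key a))
    (hq : ∀ y ∈ ys, p y = true → key y = key x) :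
    (PySem.List.insertBy (fun a b => decide (key b < key a)) x ys).find? p = some ((ys.find? p).getD x) := by
  induction ys with
  | nil => simp [PySem.List.insertBy, hx]
  | cons y ys ih =>
    rw [pv_insertBy_cons]
    by_cases h : key y < key x
    · rw [if_pos (by simp [h])]
      have hnone : (y :: ys).find? p = none := by
        rw [List.find?_eq_none]
        intro z hz hpz
        have hk := hq z hz hpz
        rcases List.mem_cons.mp hz with rfl | hz'
        · exact absurd hk (ne_of_lt h)
        · have := (List.pairwise_cons.mp hpw).1 z hz'
          have : key z < key x := lt_of_le_of_lt this h
          exact absurd hk (ne_of_lt this)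
      rw [hnone]
      simp [List.find?_cons, hx]
    · rw [if_neg (by simp [h])]
      cases hpy : p y
      · simp only [List.find?_cons, hpy]
        exact ih (List.pairwise_cons.mp hpw).2 (fun z hz => hq z (List.mem_cons_of_mem _ hz))
      · simp [List.find?_cons, hpy]

theorem pv_find?_insertBy_asc {α κ : Type} [LinearOrder κ] (key : α → κ) (p : α → Bool) (x : α) (ys : List α)
    (hx : p x = true) (hpw : ys.Pairwise (fun a b => key a ≤ key b)) :
    (PySem.List.insertBy (fun a b => decide (key a < key b)) x ys).find? p
      = some (match ys.find? p with | none => x | some b => if key x < key b then x else b) := by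
  induction ys with
  | nil => simp [PySem.List.insertBy, hx]
  | cons y ys ih =>
    rw [pv_insertBy_cons]
    by_cases h : key x < key y
    · rw [if_pos (by simp [h])]
      simp only [List.find?_cons, hx]
      cases hpy : p y
      · cases hfind : ys.find? p with
        | none => rfl
        | some b =>
          have hb : b ∈ ys := List.mem_of_find?_eq_some hfind
          have : key y ≤ key b := (List.pairwise_cons.mp hpw).1 b hb
          have : key x < key b := lt_of_lt_of_le h this
          simp [this]
      · simp [h]
    · rw [if_neg (by simp [h])]
      cases hpy : p y
      · simp only [List.find?_cons, hpy]
        exact ih (List.pairwise_cons.mp hpw).2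
      · simp only [List.find?_cons, hpy]
        simp [h]

theorem pv_find?_sorted_rev_of_const_key {α κ : Type} [LinearOrder κ] (key : α → κ) (p : α → Bool) (c : κ)
    (xs : List α) (hq : ∀ y ∈ xs, p y = true → key y = c) :
    (PySem.List.sorted xs key true).find? p = xs.find? p := by
  induction xs using List.reverseRecOn with
  | nil => simp [PySem.List.sorted]
  | append_singleton xs x ih =>
    have hstep := pv_sorted_append_single xs x key true
    simp only [if_true] at hstep
    rw [hstep]
    have hq' : ∀ y ∈ xs, p y = true → key y = c := fun y hy => hq y (List.mem_append_left _ hy)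
    cases hx : p x
    · rw [pv_find?_insertBy_of_neg _ _ _ _ hx, ih hq', List.find?_append]
      simp [List.find?_cons, hx]
    · have hkx : key x = c := hq x (by simp) hx
      rw [pv_find?_insertBy_desc key p x _ hx (PySem.List.sorted_pairwise_rev xs key)
        (fun y hy hpy => by
          rw [hq' y ((PySem.List.mem_sorted xs key true y).mp hy) hpy, hkx]),
        ih hq', List.find?_append]
      cases hfind : xs.find? p <;> simp [List.find?_cons, hx, hfind]

theorem pv_find?_sorted_asc_eq_foldl {α κ : Type} [LinearOrder κ] (key : α → κ) (p : α → Bool) (xs : List α) :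
    (PySem.List.sorted xs key false).find? p
      = xs.foldl (fun acc o => if p o then (match acc with | none => some o | some b => if key o < key b then some o else some b) else acc) none := by
  suffices h : ∀ (xs : List α) (a : Option α), a = (PySem.List.sorted xs key false).find? p →
      xs.foldl (fun acc o => if p o then (match acc with | none => some o | some b => if key o < key b then some o else some b) else acc) none = (PySem.List.sorted xs key false).find? p by
    exact (h xs _ rfl).symm
  intro xs
  induction xs using List.reverseRecOn with
  | nil => intro a _; simp [PySem.List.sorted]
  | append_singleton xs x ih =>
    intro a _
    have hstep := pv_sorted_append_single xs x key false
    simp only [if_false, Bool.false_eq_true] at hstep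
    rw [List.foldl_append, ih _ rfl, hstep]
    cases hx : p x
    · rw [pv_find?_insertBy_of_neg _ _ _ _ hx]
      simp [hx]
    · rw [pv_find?_insertBy_asc key p x _ hx (PySem.List.sorted_pairwise xs key)]
      cases hfind : (PySem.List.sorted xs key false).find? p with
      | none => simp [hx, hfind]
      | some b => simp [hx, hfind, apply_ite Option.some]

theorem pv_max?_append_single_none {α κ : Type} [LT κ] [DecidableLT κ] (xs : List α) (x : α) (key : α → κ)
    (h : PySem.List.max? xs key = none) : PySem.List.max? (xs ++ [x]) key = some x := by
  simp only [PySem.List.max?] at h ⊢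
  rw [List.foldl_append, h]
  rfl

theorem pv_max?_append_single_some {α κ : Type} [LT κ] [DecidableLT κ] (xs : List α) (x m : α) (key : α → κ)
    (h : PySem.List.max? xs key = some m) :
    PySem.List.max? (xs ++ [x]) key = if key m < key x then some x else some m := by
  simp only [PySem.List.max?] at h ⊢
  rw [List.foldl_append, h]
  rfl

theorem pv_head_sorted_rev_eq_max? {α κ : Type} [LinearOrder κ] (xs : List α) (key : α → κ) (m : α) (t : List α)
    (h : PySem.List.sorted xs key true = m :: t) : PySem.List.max? xs key = some m := by
  induction xs using List.reverseRecOn generalizing m t with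
  | nil => simp [PySem.List.sorted] at h
  | append_singleton xs x ih =>
    have hstep := pv_sorted_append_single xs x key true
    rw [if_pos rfl] at hstep
    rw [hstep] at h
    cases hs : PySem.List.sorted xs key true with
    | nil =>
      have hxs : xs = [] := (PySem.List.sorted_eq_nil_iff xs key true).mp hs
      have hmax : PySem.List.max? xs key = none := (PySem.List.max?_eq_none_iff xs key).mpr hxs
      rw [hs, pv_insertBy_nil] at h
      injection h with h1 h2
      rw [pv_max?_append_single_none _ _ _ hmax, h1]
    | cons m' t' =>
      rw [pv_max?_append_single_some _ _ _ _ (ih _ _ hs)]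
      rw [hs, pv_insertBy_cons] at h
      by_cases hlt : key m' < key x
      · rw [if_pos (by simp [hlt])] at h
        injection h with h1 h2
        rw [if_pos hlt, h1]
      · rw [if_neg (by simp [hlt])] at h
        injection h with h1 h2
        rw [if_neg hlt, h1]

theorem pv_erase_sorted_rev {α κ : Type} [LinearOrder κ] [BEq α] [LawfulBEq α] (xs : List α) (key : α → κ) (m : α) (t : List α)
    (h : PySem.List.sorted xs key true = m :: t) : PySem.List.sorted (xs.erase m) key true = t := by
  induction xs using List.reverseRecOn generalizing m t with
  | nil => simp [PySem.List.sorted] at h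
  | append_singleton xs x ih =>
    have hstep := pv_sorted_append_single xs x key true
    rw [if_pos rfl] at hstep
    rw [hstep] at h
    cases hs : PySem.List.sorted xs key true with
    | nil =>
      have hxs : xs = [] := (PySem.List.sorted_eq_nil_iff xs key true).mp hs
      subst hxs
      rw [hs, pv_insertBy_nil] at h
      injection h with h1 h2
      subst h1; subst h2
      simp [PySem.List.sorted]
    | cons m' t' =>
      rw [hs, pv_insertBy_cons] at h
      by_cases hlt : key m' < key x
      · rw [if_pos (by simp [hlt])] at h
        injection h with h1 h2
        subst h2
        rw [← h1]
        have hmax : ∀ y ∈ xs, key y ≤ key m' := PySem.List.key_head_sorted_rev_ge xs key hs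
        have hxnot : x ∉ xs := fun hx => absurd (hmax x hx) (not_le.mpr hlt)
        rw [List.erase_append_right _ hxnot]
        simpa using hs
      · rw [if_neg (by simp [hlt])] at h
        injection h with h1 h2
        subst h2
        rw [← h1]
        have hmem : m' ∈ xs := (PySem.List.mem_sorted xs key true m').mp (by rw [hs]; exact List.mem_cons_self ..)
        rw [List.erase_append_left _ hmem, pv_sorted_append_single, if_pos rfl, ih _ _ hs]

theorem pv_lowerChar_idem (c : Char) : PySem.Chars.lowerChar (PySem.Chars.lowerChar c) = PySem.Chars.lowerChar c := by
  by_cases h : PySem.Chars.isupper c = true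
  · have hc : PySem.Chars.lowerChar c = Char.ofNat (c.toNat + 32) := by
      rw [PySem.Chars.lowerChar, if_pos h]
    simp only [PySem.Chars.isupper, Bool.and_eq_true, decide_eq_true_eq] at h
    have hA : 65 ≤ c.toNat := Nat.succ_le_of_lt h.1
    have hZ : c.toNat ≤ 90 := h.2
    have htoNat : (Char.ofNat (c.toNat + 32)).toNat = c.toNat + 32 := by
      have hv : (c.toNat + 32).isValidChar := Or.inl (by omega)
      unfold Char.ofNat
      rw [dif_pos hv]
      simp only [Char.ofNatAux, Char.toNat, UInt32.toNat, BitVec.toNat_ofNatLT]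
    have hup : PySem.Chars.isupper (Char.ofNat (c.toNat + 32)) = false := by
      have hnot : ¬ (Char.ofNat (c.toNat + 32) ≤ 'Z') := by
        intro hcle
        have hle : (Char.ofNat (c.toNat + 32)).toNat ≤ ('Z').toNat := hcle
        have hq : ('Z').toNat = 90 := rfl
        omega
      simp [PySem.Chars.isupper, hnot]
    rw [hc, PySem.Chars.lowerChar, if_neg (by simp [hup])]
  · have hc : PySem.Chars.lowerChar c = c := by
      rw [PySem.Chars.lowerChar, if_neg h]
    rw [hc, hc]

theorem pv_lower_idem (s : String) : PySem.Str.lower (PySem.Str.lower s) = PySem.Str.lower s := by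
  unfold PySem.Str.lower PySem.Chars.lower
  rw [String.toList_ofList, List.map_map]
  congr 1
  apply List.map_congr_left
  intro a _
  exact pv_lowerChar_idem a

theorem pv_dict_build_get? (objs : List (List (String × String))) (k : String) (ci : Bool) (w : String) :
    (objs.foldl (fun d o => if d.contains (pvVal k ci o) then d else d.insert (pvVal k ci o) o) PySem.Dict.empty).get? w
      = pvExact objs k ci w := by
  suffices h : ∀ (xs : List (List (String × String))) (d : PySem.Dict String (List (String × String))),
      (xs.foldl (fun d o => if d.contains (pvVal k ci o) then d else d.insert (pvVal k ci o) o) d).get? w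
        = (d.get? w).or (pvExact xs k ci w) by
    rw [h objs PySem.Dict.empty, PySem.Dict.get?_empty, Option.none_or]
  intro xs
  induction xs with
  | nil => intro d; simp [pvExact]
  | cons o xs ih =>
    intro d
    simp only [List.foldl_cons]
    rw [ih]
    by_cases hw : pvVal k ci o = w
    · have hfind : pvExact (o :: xs) k ci w = some o := by
        unfold pvExact
        exact List.find?_cons_of_pos (by simp [hw])
      rw [hfind]
      by_cases hc : d.contains (pvVal k ci o) = true
      · rw [if_pos hc]
        have hsome : (d.get? w).isSome := by
          rw [← hw, ← PySem.Dict.contains_eq_isSome_get?, hc]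
        obtain ⟨v, hv⟩ := Option.isSome_iff_exists.mp hsome
        rw [hv]
        rfl
      · rw [if_neg hc]
        have hnone : d.get? w = none := by
          rw [← Option.not_isSome_iff_eq_none, ← hw, ← PySem.Dict.contains_eq_isSome_get?]
          simp [hc]
        rw [PySem.Dict.get?_insert, if_pos hw.symm, hnone]
        rfl
    · have hfind : pvExact (o :: xs) k ci w = pvExact xs k ci w := by
        unfold pvExact
        exact List.find?_cons_of_neg (by simp [hw])
      rw [hfind]
      by_cases hc : d.contains (pvVal k ci o) = true
      · rw [if_pos hc]
      · rw [if_neg hc, PySem.Dict.get?_insert, if_neg (fun hh => hw hh.symm)]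

-- B equals pvCore of the sorted (effective) value list
theorem pv_alt_eq_core (objs : List (List (String × String))) (lov : List String) (k : String) (ci : Bool) :
    getFromLongestMatchingValue_alt objs lov k ci
      = pvCore objs k ci (PySem.List.sorted (if ci then lov.map PySem.Str.lower else lov) PySem.Str.len true) := by
  have hpred : (fun v => (objs.foldl (fun d o => if d.contains (pvVal k ci o) then d else d.insert (pvVal k ci o) o) PySem.Dict.empty).contains v)
      = (fun v => (pvExact objs k ci v).isSome) := by
    funext v
    rw [PySem.Dict.contains_eq_isSome_get?, pv_dict_build_get?]
  simp only [getFromLongestMatchingValue_alt, pvCore]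
  simp only [pvVal] at hpred
  rw [hpred]
  cases hfind : (PySem.List.sorted (if ci then lov.map PySem.Str.lower else lov) PySem.Str.len true).find? (fun v => (pvExact objs k ci v).isSome) with
  | some v =>
    simp only [hfind]
    have hd := pv_dict_build_get? objs k ci v
    simp only [pvVal] at hd
    rw [hd]
  | none =>
    simp only [hfind]
    cases hlast : (PySem.List.sorted (if ci then lov.map PySem.Str.lower else lov) PySem.Str.len true).getLast? with
    | none => rfl
    | some last =>
      simp only [hlast, pvFallback, pvVal]
      rfl

-- helper facts for the main induction
theorem pv_len_val (k : String) (ci : Bool) (o : List (String × String)) :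
    PySem.Str.len (pvVal k ci o) = PySem.Str.len (pvGet o k) := by
  cases ci <;> simp [pvVal, PySem.Str.len, PySem.Str.lower, PySem.Chars.lower, String.toList_ofList]

theorem pv_pred1_eq (k : String) (ci : Bool) (m : String) :
    (fun (o : List (String × String)) => decide (some (if ci = true then PySem.Str.lower (pvGet o k) else pvGet o k) = some m))
      = (fun o => pvVal k ci o == m) := by
  funext o
  by_cases h : (if ci = true then PySem.Str.lower (pvGet o k) else pvGet o k) = m <;> simp [pvVal, h]

theorem pv_core_cons (objs : List (List (String × String))) (k : String) (ci : Bool) (m : String) (t : List String)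
    (hE : pvExact objs k ci m = none) (ht : t ≠ []) :
    pvCore objs k ci (m :: t) = pvCore objs k ci t := by
  unfold pvCore
  rw [List.find?_cons_of_neg (by simp [hE])]
  cases t with
  | nil => exact absurd rfl ht
  | cons t0 ts => rw [List.getLast?_cons_cons]

theorem pv_all_nil_of_head_nil {w : List String} {t : List String}
    (hs : PySem.List.sorted w PySem.Str.len true = "" :: t) : ∀ y ∈ w, y = "" := by
  intro y hy
  have hle := PySem.List.key_head_sorted_rev_ge w PySem.Str.len hs y hy
  rw [PySem.Str.len_eq, PySem.Str.len_eq] at hle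
  have h0 : ("" : String).toList.length = 0 := rfl
  have : y.toList.length = 0 := by omega
  exact String.toList_eq_nil_iff.mp (List.length_eq_zero_iff.mp this)

-- A's rounds compute pvCore of the stable length-descending sort of the (lowered) value list
theorem pv_len_val' (k : String) (ci : Bool) (o : List (String × String)) :
    PySem.Str.len (if ci = true then PySem.Str.lower (pvGet o k) else pvGet o k) = PySem.Str.len (pvGet o k) := by
  cases ci <;> simp [PySem.Str.len, PySem.Str.lower, PySem.Chars.lower, String.toList_ofList]

-- A's rounds compute pvCore of the stable length-descending sort of the (lowered) value list
theorem pv_A_rec (objs : List (List (String × String))) (k : String) (ci : Bool) :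
    ∀ (fuel : Nat) (w : List String), w.length < fuel →
      (("" ∈ (if ci then w.map PySem.Str.lower else w)) →
        ∃ v ∈ (if ci then w.map PySem.Str.lower else w), (pvExact objs k ci v).isSome) →
      getFLMVGo fuel objs w k ci
        = pvCore objs k ci (PySem.List.sorted (if ci then w.map PySem.Str.lower else w) PySem.Str.len true) := by
  intro fuel
  induction fuel with
  | zero => intro w hlen _; omega
  | succ fuel ih =>
    intro w hlen hgood
    simp only [getFLMVGo]
    cases hs : PySem.List.sorted (if ci then w.map PySem.Str.lower else w) PySem.Str.len true with
    | nil =>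
      have hw : (if ci then w.map PySem.Str.lower else w) = [] :=
        (PySem.List.sorted_eq_nil_iff _ _ _).mp hs
      rw [hw]
      have hf : ∀ (l : List (List (String × String))) (p : List (String × String) → Bool),
          (∀ x, p x = false) → l.find? p = none :=
        fun l p hp => List.find?_eq_none.mpr (fun x _ => by simp [hp x])
      simp [pvCore, hs, hf]
    | cons m t =>
      -- the current round's value is the head of the sorted list
      have hmem : m ∈ (if ci then w.map PySem.Str.lower else w) :=
        (PySem.List.mem_sorted _ _ _ m).mp (hs ▸ List.mem_cons_self ..)
      have hne : (if ci then w.map PySem.Str.lower else w) ≠ [] :=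
        fun hnil => by rw [hnil] at hmem; exact absurd hmem (List.not_mem_nil)
      have hvalue : (if (if ci then w.map PySem.Str.lower else w).length ≠ 0 then
          PySem.List.max? ((if ci then w.map PySem.Str.lower else w).map (fun k => k)) PySem.Str.len else none) = some m := by
        rw [if_pos (fun h0 => hne (List.length_eq_zero_iff.mp h0)), List.map_id']
        exact pv_head_sorted_rev_eq_max? _ _ _ _ hs
      -- the first object scan equals the unsorted first-match scan
      have hfirst : (PySem.List.sorted objs (fun i => PySem.Str.len (pvGet i k)) true).find?
            (fun o => decide (some (if ci = true then PySem.Str.lower (pvGet o k) else pvGet o k) = some m))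
          = pvExact objs k ci m := by
        rw [pv_pred1_eq]
        exact pv_find?_sorted_rev_of_const_key (fun i => PySem.Str.len (pvGet i k)) _ (PySem.Str.len m) objs
          (fun y _ hp => by
            have hm : pvVal k ci y = m := by simpa using hp
            show PySem.Str.len (pvGet y k) = PySem.Str.len m
            rw [← hm, pv_len_val])
      simp only [hvalue, hfirst]
      cases hE : pvExact objs k ci m with
      | some o =>
        simp only [pvCore]
        rw [List.find?_cons_of_pos (by simp [hE])]
        show o = (pvExact objs k ci m).getD []
        rw [hE]
        rfl
      | none =>
        -- m ≠ "" : otherwise every value is "" and hgood contradicts hE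
        have hmne : m ≠ "" := by
          intro hm
          subst hm
          obtain ⟨v, hv, hvs⟩ := hgood hmem
          have : v = "" := pv_all_nil_of_head_nil hs v hv
          subst this
          rw [hE] at hvs
          simp at hvs
        have hcond : (m ≠ "" ∧ m ∈ (if ci then w.map PySem.Str.lower else w)) := ⟨hmne, hmem⟩
        rw [if_pos hcond, PySem.List.remove?_eq_some_erase _ _ hmem, Option.getD_some]
        have hst := pv_erase_sorted_rev _ _ _ _ hs
        cases t with
        | nil =>
          have hempty : (if ci then w.map PySem.Str.lower else w).erase m = [] :=
            (PySem.List.sorted_eq_nil_iff _ _ _).mp hst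
          rw [hempty]
          rw [if_neg (by simp)]
          -- fallback loop: first prefix-match in the ascending sort = B's running minimum
          rw [pv_find?_sorted_asc_eq_foldl (fun i => PySem.Str.len (pvGet i k))
            (fun o => decide (some (if PySem.Str.isIn "-" (if ci = true then PySem.Str.lower (pvGet o k) else pvGet o k) = true then
                  ((PySem.Str.split? (if ci = true then PySem.Str.lower (pvGet o k) else pvGet o k) "-").getD []).headD ""
                else if ci = true then PySem.Str.lower (pvGet o k) else pvGet o k) = some m)) objs]
          -- right-hand side: the singleton sorted list falls through to the fallback with last = m
          simp only [pvCore]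
          rw [List.find?_cons_of_neg (by simp [hE])]
          simp only [List.find?_nil, List.getLast?_singleton, pvFallback, pvVal]
          refine congrArg (fun (x : Option (List (String × String))) => x.getD []) ?_
          apply PySem.List.foldl_congr_mem
          intro acc o _
          by_cases hg : (if PySem.Str.isIn "-" (if ci = true then PySem.Str.lower (pvGet o k) else pvGet o k) = true then
                ((PySem.Str.split? (if ci = true then PySem.Str.lower (pvGet o k) else pvGet o k) "-").getD []).headD ""
              else if ci = true then PySem.Str.lower (pvGet o k) else pvGet o k) = m
          · rw [if_pos (by simpa using hg), if_pos hg]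
            cases acc with
            | none => rfl
            | some b =>
              show (if PySem.Str.len (pvGet o k) < PySem.Str.len (pvGet b k) then some o else some b)
                = (if PySem.Str.len (if ci = true then PySem.Str.lower (pvGet o k) else pvGet o k)
                    < PySem.Str.len (if ci = true then PySem.Str.lower (pvGet b k) else pvGet b k) then some o else some b)
              rw [pv_len_val', pv_len_val']
          · rw [if_neg (by simpa using hg), if_neg hg]
        | cons t0 ts =>
          have htne : (if ci then w.map PySem.Str.lower else w).erase m ≠ [] := by
            intro hnil
            rw [hnil] at hst
            simp [PySem.List.sorted] at hst
          rw [if_pos (by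
            have := List.length_pos_of_ne_nil htne
            omega)]
          have hfix : (if ci then ((if ci then w.map PySem.Str.lower else w).erase m).map PySem.Str.lower
              else ((if ci then w.map PySem.Str.lower else w).erase m))
              = (if ci then w.map PySem.Str.lower else w).erase m := by
            cases hci : ci with
            | false => rfl
            | true =>
              simp only [if_pos rfl]
              refine (List.map_congr_left ?_).trans (List.map_id _)
              intro x hx
              have hx' : x ∈ w.map PySem.Str.lower := by
                have := List.mem_of_mem_erase hx
                simpa [hci] using this
              obtain ⟨y, _, rfl⟩ := List.mem_map.mp hx'
              exact pv_lower_idem y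
          have hlen2 : ((if ci then w.map PySem.Str.lower else w).erase m).length < fuel := by
            have h1 : (if ci then w.map PySem.Str.lower else w).length = w.length := by
              cases ci <;> simp
            have h2 : ((if ci then w.map PySem.Str.lower else w).erase m).length
                = (if ci then w.map PySem.Str.lower else w).length - 1 := List.length_erase_of_mem hmem
            have h3 := List.length_pos_of_ne_nil hne
            omega
          have hgood2 : ("" ∈ (if ci then ((if ci then w.map PySem.Str.lower else w).erase m).map PySem.Str.lower
              else ((if ci then w.map PySem.Str.lower else w).erase m))) →
              ∃ v ∈ (if ci then ((if ci then w.map PySem.Str.lower else w).erase m).map PySem.Str.lower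
                else ((if ci then w.map PySem.Str.lower else w).erase m)), (pvExact objs k ci v).isSome := by
            rw [hfix]
            intro hmm
            obtain ⟨v, hv, hvs⟩ := hgood (List.mem_of_mem_erase hmm)
            refine ⟨v, ?_, hvs⟩
            have hvne : v ≠ m := by
              intro hvm
              rw [hvm, hE] at hvs
              simp at hvs
            exact (List.mem_erase_of_ne hvne).mpr hv
          have hrec := ih _ hlen2 hgood2
          rw [hrec, hfix, hst]
          exact (pv_core_cons objs k ci m (t0 :: ts) hE (by simp)).symm

-- ===== VERDICT (by name: the statement is the Claim_ definition above) =====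
theorem getFromLongestMatchingValue_spec : Claim_equal_getFromLongestMatchingValue := by
  intro objs lov k ci _ hpre
  unfold Spec_getFromLongestMatchingValue
  rw [pv_alt_eq_core]
  unfold getFromLongestMatchingValue
  apply pv_A_rec objs k ci (lov.length + 1) lov (by omega)
  intro hmm
  simp only [Pre_getFromLongestMatchingValue] at hpre
  obtain ⟨o, ho, hv⟩ := hpre hmm
  exact ⟨_, hv, List.find?_isSome.mpr ⟨o, ho, by simp [pvVal]⟩⟩
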